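-- pv_equiv track=rewrite | github.com/lucas-seixas/learning-python | atividades/soma_hipotenusas.py | soma_hipotenusas
-- ===== SOURCE A (Python) =====
-- def é_hipotenusa(n):
--
--     i = 1
--     j = 1
--     temHipotenusa = False
--
--     while i < n:
--         j = 1
--         while j < n:
--             if n**2 == i**2 + j**2:
--                 temHipotenusa = True
--             j+=1
--         i+=1
--
--     return temHipotenusa
--
-- def soma_hipotenusas(n):
--
--     aux = 1
--     soma = 0
--     while aux <= n:
--         if é_hipotenusa(aux) == True:
--             soma = soma + aux
--         aux+=1
--
--     return soma
-- ===== SOURCE B (Python) =====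
-- def soma_hipotenusas(n):
--     squares = {i * i for i in range(1, n + 1)}
--     total = 0
--     for k in range(1, n + 1):
--         kk = k * k
--         if any(kk - i * i in squares for i in range(1, k)):
--             total += k
--     return total
-- ===== Notes on version B (the rewrite author's own statement) =====
-- stated objective: faster
-- what changed: Replaces the triple nested loop (for each candidate, scan all leg pairs setting a flag) by a precomputed set of squares and, per candidate, a single leg scan testing set membership of k^2-i^2 with early exit.
import Mathlib
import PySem

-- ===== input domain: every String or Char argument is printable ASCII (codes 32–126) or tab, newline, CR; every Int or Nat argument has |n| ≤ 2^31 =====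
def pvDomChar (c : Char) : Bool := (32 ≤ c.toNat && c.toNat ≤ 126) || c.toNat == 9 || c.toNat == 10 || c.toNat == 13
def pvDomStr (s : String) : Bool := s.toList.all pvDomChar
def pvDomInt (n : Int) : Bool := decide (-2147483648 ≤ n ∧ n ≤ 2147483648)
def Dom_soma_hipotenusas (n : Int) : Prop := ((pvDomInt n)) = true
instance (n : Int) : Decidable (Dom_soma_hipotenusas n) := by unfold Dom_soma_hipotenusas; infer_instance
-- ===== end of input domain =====

-- B precomputes the set of squares once and tests k*k - i*i for membership with an
-- early-exit `any`, replacing A's triple nested flag-setting loop (O(n^3) → O(n^2)).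

-- ===== PORT A =====
def e_hipotenusa (n : Int) : Bool :=
  (PySem.List.pyRange 1 n 1).foldl (fun flag i =>
    (PySem.List.pyRange 1 n 1).foldl (fun flag j =>
      if n ^ 2 == i ^ 2 + j ^ 2 then true else flag) flag) false

def soma_hipotenusas (n : Int) : Int :=
  (PySem.List.pyRange 1 (n + 1) 1).foldl (fun soma aux =>
    if e_hipotenusa aux == true then soma + aux else soma) 0

-- ===== PORT B =====
def soma_hipotenusas_alt (n : Int) : Int :=
  let squares : PySem.Set Int :=
    PySem.Set.ofList ((PySem.List.pyRange 1 (n + 1) 1).map (fun i => i * i))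
  (PySem.List.pyRange 1 (n + 1) 1).foldl (fun total k =>
    let kk := k * k
    if (PySem.List.pyRange 1 k 1).any (fun i => PySem.Set.contains squares (kk - i * i)) then
      total + k
    else total) 0

-- ===== PRECONDITION & SPEC =====
def Spec_soma_hipotenusas (n : Int) (out : Int) : Prop := out = soma_hipotenusas_alt n
instance (n : Int) (out : Int) : Decidable (Spec_soma_hipotenusas n out) := by unfold Spec_soma_hipotenusas; infer_instance

-- ===== CLAIM (what is proved, stated in full; the proofs are below) =====
def Claim_equal_soma_hipotenusas : Prop := ∀ (n : Int), Dom_soma_hipotenusas n → Spec_soma_hipotenusas n (soma_hipotenusas n)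

-- ===== LEMMAS AND PROOFS =====

theorem foldl_or_left {α : Type} (l : List α) (g : α → Bool) (b : Bool) :
    l.foldl (fun acc x => g x || acc) b = (b || l.any g) := by
  induction l generalizing b with
  | nil => simp
  | cons x t ih => simp [List.foldl, ih]; cases g x <;> cases b <;> simp

theorem foldl_or_right {α : Type} (l : List α) (g : α → Bool) (b : Bool) :
    l.foldl (fun acc x => acc || g x) b = (b || l.any g) := by
  induction l generalizing b with
  | nil => simp
  | cons x t ih => simp [List.foldl, ih, Bool.or_assoc]

theorem e_hipotenusa_eq_any (n : Int) :
    e_hipotenusa n =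
      (PySem.List.pyRange 1 n 1).any (fun i =>
        (PySem.List.pyRange 1 n 1).any (fun j => n ^ 2 == i ^ 2 + j ^ 2)) := by
  unfold e_hipotenusa
  simp [foldl_or_left, foldl_or_right]
  rfl

-- For 1 ≤ k ≤ n and 1 ≤ i < k: A's inner scan over legs j ∈ [1,k) equals B's
-- membership test of k*k - i*i in the set of squares of [1,n].
theorem inner_eq (n k i : Int) (hk1 : 1 ≤ k) (hkn : k ≤ n) (hi1 : 1 ≤ i) (_hik : i < k) :
    (PySem.List.pyRange 1 k 1).any (fun j => k ^ 2 == i ^ 2 + j ^ 2) =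
      PySem.Set.contains
        (PySem.Set.ofList ((PySem.List.pyRange 1 (n + 1) 1).map (fun i => i * i)))
        (k * k - i * i) := by
  rw [Bool.eq_iff_iff]
  rw [PySem.Set.contains_iff, PySem.Set.mem_ofList]
  simp only [List.any_eq_true, PySem.List.mem_pyRange_one, List.mem_map, beq_iff_eq]
  constructor
  · rintro ⟨j, ⟨hj1, hjk⟩, hEq⟩
    exact ⟨j, ⟨hj1, by omega⟩, by nlinarith⟩
  · rintro ⟨j, ⟨hj1, hjn⟩, hEq⟩
    refine ⟨j, ⟨hj1, by nlinarith⟩, by nlinarith⟩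

-- ===== VERDICT (by name: the statement is the Claim_ definition above) =====
theorem soma_hipotenusas_spec : Claim_equal_soma_hipotenusas := by
  intro n _
  unfold Spec_soma_hipotenusas soma_hipotenusas soma_hipotenusas_alt
  dsimp only
  apply PySem.List.foldl_congr_mem
  intro acc k hkmem
  rw [PySem.List.mem_pyRange_one] at hkmem
  have hany : (PySem.List.pyRange 1 k 1).any (fun i =>
        (PySem.List.pyRange 1 k 1).any (fun j => k ^ 2 == i ^ 2 + j ^ 2)) =
      (PySem.List.pyRange 1 k 1).any (fun i =>
        PySem.Set.contains
          (PySem.Set.ofList ((PySem.List.pyRange 1 (n + 1) 1).map (fun i => i * i)))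
          (k * k - i * i)) := by
    refine PySem.List.any_congr_mem ?_
    intro i himem
    rw [PySem.List.mem_pyRange_one] at himem
    exact inner_eq n k i hkmem.1 (by omega) himem.1 himem.2
  simp only [e_hipotenusa_eq_any, hany, beq_iff_eq]
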